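-- pv_equiv track=rewrite | github.com/Dinnerb0ne2/pvim | src/features/refactor.py | find_next
-- ===== SOURCE A (Python) =====
-- def find_next(lines: list[str], query: str, start_row: int, start_col: int) -> tuple[int, int] | None:
--     if not query:
--         return None
--     if not lines:
--         return None
--
--     total = len(lines)
--     row = max(0, min(start_row, total - 1))
--     col = max(0, start_col)
--
--     for current in range(row, total):
--         text = lines[current]
--         from_col = col if current == row else 0
--         index = text.find(query, from_col)
--         if index >= 0:
--             return current, index
--
--     for current in range(0, row):
--         index = lines[current].find(query)
--         if index >= 0:
--             return current, index
--
--     return None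
-- ===== SOURCE B (Python) =====
-- def find_next(lines: list[str], query: str, start_row: int, start_col: int) -> tuple[int, int] | None:
--     if not query or not lines:
--         return None
--
--     total = len(lines)
--     row = max(0, min(start_row, total - 1))
--     col = max(0, start_col)
--
--     # Collect every line's first match (the start row searched from col),
--     # then pick the candidate closest to the cursor in cyclic distance.
--     hits = []
--     for r in range(total):
--         text = lines[r]
--         idx = text.find(query, col) if r == row else text.find(query)
--         if idx >= 0:
--             hits.append(((r - row) % total, r, idx))
--
--     if not hits:
--         return None
--     _, r, idx = min(hits)
--     return (r, idx)
-- ===== Notes on version B (the rewrite author's own statement) =====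
-- stated objective: alternative
-- what changed: Instead of A's early-return wrap-around scan (row..end then 0..row), B computes every line's first match in plain 0..n-1 order and then selects the candidate with minimal cyclic distance (r - row) % total via min().
import Mathlib
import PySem

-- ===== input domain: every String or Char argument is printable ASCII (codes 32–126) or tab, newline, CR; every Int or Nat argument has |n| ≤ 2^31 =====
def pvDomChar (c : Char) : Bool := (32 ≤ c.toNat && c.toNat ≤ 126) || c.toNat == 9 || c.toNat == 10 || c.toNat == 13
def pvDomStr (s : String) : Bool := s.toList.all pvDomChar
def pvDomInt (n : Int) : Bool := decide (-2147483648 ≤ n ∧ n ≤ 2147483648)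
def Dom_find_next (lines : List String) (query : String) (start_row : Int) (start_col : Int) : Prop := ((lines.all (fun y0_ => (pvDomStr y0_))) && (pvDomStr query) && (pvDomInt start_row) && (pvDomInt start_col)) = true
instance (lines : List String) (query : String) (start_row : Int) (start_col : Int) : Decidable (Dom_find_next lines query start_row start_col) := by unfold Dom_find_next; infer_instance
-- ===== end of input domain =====

-- B replaces A's early-return wrap-around scan by collecting every line's first match and
-- selecting the candidate with minimal cyclic distance; same cost, different algorithm shape.

-- exact hand port of CPython's str.find(sub, start) (PySem.Str.findFrom is exact too but too slow
-- to evaluate for start near 2^31): start is read as a slice bound (negative from the end, clamped),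
-- a start past len(s) gives -1; used by both ports for 'text.find(query, from_col)'
def pyFindFrom (s : String) (sub : String) (start : Int) : Int :=
  let n : Int := PySem.Str.len s
  if start > n then -1
  else
    let k : Nat := (if start < 0 then max 0 (n + start) else start).toNat
    let r := PySem.Chars.find (s.toList.drop k) sub.toList
    if r = -1 then -1 else (k : Int) + r

-- ===== PORT A =====
-- first loop: for current in range(row, total), from_col = col if current == row else 0
def fnLoop1 (lines : List String) (query : String) (row col : Int) : List Int → Option (Int × Int)
  | [] => none
  | current :: rest =>
    let text := PySem.List.pyGetD lines current ""
    let from_col := if current == row then col else 0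
    let index := pyFindFrom text query from_col
    if index ≥ 0 then some (current, index) else fnLoop1 lines query row col rest

-- second loop: for current in range(0, row), text.find(query)
def fnLoop2 (lines : List String) (query : String) : List Int → Option (Int × Int)
  | [] => none
  | current :: rest =>
    let index := PySem.Str.find (PySem.List.pyGetD lines current "") query
    if index ≥ 0 then some (current, index) else fnLoop2 lines query rest

def find_next (lines : List String) (query : String) (start_row : Int) (start_col : Int) : Option (Int × Int) :=
  if query = "" then none
  else if lines = [] then none
  else
    let total : Int := lines.length
    let row := max 0 (min start_row (total - 1))
    let col := max 0 start_col
    match fnLoop1 lines query row col (PySem.List.pyRange row total 1) with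
    | some r => some r
    | none => fnLoop2 lines query (PySem.List.pyRange 0 row 1)

-- ===== PORT B =====
-- Python tuple comparison on B's (distance, row, index) triples: lexicographic <
def tripLt (a b : Int × Int × Int) : Bool :=
  a.1 < b.1 || (a.1 == b.1 && (a.2.1 < b.2.1 || (a.2.1 == b.2.1 && a.2.2 < b.2.2)))

-- min(hits): iterate, keep the current best unless a strictly smaller triple appears
def tripMin (best : Int × Int × Int) : List (Int × Int × Int) → Int × Int × Int
  | [] => best
  | h :: t => tripMin (if tripLt h best then h else best) t

-- the hits loop: for r in range(total), first match of the line (start row searched from col)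
def fnHits (lines : List String) (query : String) (row col total : Int) : List (Int × Int × Int) :=
  (PySem.List.pyRange 0 total 1).filterMap fun r =>
    let text := PySem.List.pyGetD lines r ""
    let idx := if r == row then pyFindFrom text query col else PySem.Str.find text query
    if idx ≥ 0 then some (PySem.Int.mod (r - row) total, r, idx) else none

def find_next_alt (lines : List String) (query : String) (start_row : Int) (start_col : Int) : Option (Int × Int) :=
  if query = "" ∨ lines = [] then none
  else
    let total : Int := lines.length
    let row := max 0 (min start_row (total - 1))
    let col := max 0 start_col
    match fnHits lines query row col total with
    | [] => none
    | h :: t => let m := tripMin h t; some (m.2.1, m.2.2)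

-- ===== PRECONDITION & SPEC =====
def Spec_find_next (lines : List String) (query : String) (start_row : Int) (start_col : Int) (out : Option (Int × Int)) : Prop := out = find_next_alt lines query start_row start_col
instance (lines : List String) (query : String) (start_row : Int) (start_col : Int) (out : Option (Int × Int)) : Decidable (Spec_find_next lines query start_row start_col out) := by unfold Spec_find_next; infer_instance

-- ===== CLAIM (what is proved, stated in full; the proofs are below) =====
def Claim_equal_find_next : Prop := ∀ (lines : List String) (query : String) (start_row : Int) (start_col : Int), Dom_find_next lines query start_row start_col → Spec_find_next lines query start_row start_col (find_next lines query start_row start_col)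

-- ===== LEMMAS AND PROOFS =====

-- a generic first-hit scan over (row index, start column) pairs; A's two loops reduce to it
def fnScan (lines : List String) (query : String) : List (Int × Int) → Option (Int × Int)
  | [] => none
  | (c, f) :: rest =>
    let index := pyFindFrom (PySem.List.pyGetD lines c "") query f
    if index ≥ 0 then some (c, index) else fnScan lines query rest

theorem fnScan_append (lines : List String) (query : String) (l1 l2 : List (Int × Int)) :
    fnScan lines query (l1 ++ l2) =
      match fnScan lines query l1 with
      | some r => some r
      | none => fnScan lines query l2 := by
  induction l1 with
  | nil => simp [fnScan]
  | cons p rest ih =>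
    obtain ⟨c, f⟩ := p
    simp only [List.cons_append, fnScan]
    split <;> simp [ih]

theorem fnLoop1_eq_scan (lines : List String) (query : String) (row col : Int) (l : List Int) :
    fnLoop1 lines query row col l =
      fnScan lines query (l.map (fun c => (c, if c == row then col else 0))) := by
  induction l with
  | nil => rfl
  | cons c rest ih => simp only [fnLoop1, List.map_cons, fnScan]; split <;> simp [ih]

theorem pyFindFrom_zero (s sub : String) : pyFindFrom s sub 0 = PySem.Str.find s sub := by
  unfold pyFindFrom
  have h : ¬ ((0:Int) > PySem.Str.len s) := by
    simp [PySem.Str.len]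
  simp only [h, if_false, if_neg (by omega : ¬ ((0:Int) < 0))]
  simp only [Int.toNat_zero, List.drop_zero, PySem.Str.find]
  by_cases hr : PySem.Chars.find s.toList sub.toList = -1 <;> simp [hr]

theorem fnLoop2_eq_scan (lines : List String) (query : String) (l : List Int) :
    fnLoop2 lines query l = fnScan lines query (l.map (fun c => (c, 0))) := by
  induction l with
  | nil => rfl
  | cons c rest ih =>
    simp only [fnLoop2, List.map_cons, fnScan, pyFindFrom_zero]
    split <;> simp [ih]

theorem fnRotated_split (row total col : Int) (h0 : 0 ≤ row) (h1 : row < total) :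
    (PySem.List.pyRange 0 total 1).map (fun i => (PySem.Int.mod (row + i) total, if i == 0 then col else (0:Int)))
      = (PySem.List.pyRange row total 1).map (fun c => (c, if c == row then col else 0))
        ++ (PySem.List.pyRange 0 row 1).map (fun c => (c, (0:Int))) := by
  rw [PySem.List.pyRange_one_append 0 (total - row) total (by omega) (by omega), List.map_append]
  congr 1
  · rw [PySem.List.pyRange_one, PySem.List.pyRange_one, List.map_map, List.map_map]
    rw [show total - row - 0 = total - row from by ring]
    apply List.map_congr_left
    intro k hk
    simp only [List.mem_range] at hk
    have hk' : (k : Int) < total - row := by omega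
    simp only [Function.comp]
    have hmod : PySem.Int.mod (row + (0 + (k : Int))) total = row + (0 + (k : Int)) := by
      rw [PySem.Int.mod_eq_emod_of_pos (by omega)]
      exact Int.emod_eq_of_lt (by omega) (by omega)
    rw [hmod]
    have : ((0 + (k : Int)) == 0) = ((row + (k : Int)) == row) := by
      by_cases h : (k : Int) = 0 <;> simp [h]
    simp only [zero_add] at this ⊢
    rw [this]
  · rw [PySem.List.pyRange_one, PySem.List.pyRange_one, List.map_map, List.map_map]
    have hlen : (total - (total - row)).toNat = (row - 0).toNat := by omega
    rw [hlen]
    apply List.map_congr_left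
    intro k hk
    simp only [List.mem_range] at hk
    have hk' : (k : Int) < row := by omega
    simp only [Function.comp]
    have hmod : PySem.Int.mod (row + (total - row + (k : Int))) total = (k : Int) := by
      rw [PySem.Int.mod_eq_emod_of_pos (by omega),
        show row + (total - row + (k : Int)) = (k : Int) + total * 1 from by ring,
        Int.add_mul_emod_self_left]
      exact Int.emod_eq_of_lt (by omega) (by omega)
    rw [hmod]
    have hne : (total - row + (k : Int) == 0) = false := by
      simp only [beq_eq_false_iff_ne, ne_eq]
      omega
    simp [hne]

-- keyed rotated hit list: the candidates in A's scan order, carrying their cyclic distance i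
def fnKeyG (lines : List String) (query : String) (t : Int × Int × Int) : Option (Int × Int × Int) :=
  if pyFindFrom (PySem.List.pyGetD lines t.2.1 "") query t.2.2 ≥ 0
  then some (t.1, t.2.1, pyFindFrom (PySem.List.pyGetD lines t.2.1 "") query t.2.2)
  else none

def fnRotHits (lines : List String) (query : String) (row col total : Int) : List (Int × Int × Int) :=
  ((PySem.List.pyRange 0 total 1).map
    (fun i => (i, PySem.Int.mod (row + i) total, if i == 0 then col else (0:Int)))).filterMap
      (fnKeyG lines query)

theorem fnScan_eq_head (lines : List String) (query : String) (K : List (Int × Int × Int)) :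
    fnScan lines query (K.map (fun t => (t.2.1, t.2.2)))
      = ((K.filterMap (fnKeyG lines query)).head?).map (fun t => (t.2.1, t.2.2)) := by
  induction K with
  | nil => rfl
  | cons t rest ih =>
    obtain ⟨k, c, f⟩ := t
    by_cases hidx : pyFindFrom (PySem.List.pyGetD lines c "") query f ≥ 0
    · have hg : fnKeyG lines query (k, c, f)
          = some (k, c, pyFindFrom (PySem.List.pyGetD lines c "") query f) := by
        simp [fnKeyG, hidx]
      simp only [List.map_cons, List.filterMap_cons, hg, fnScan]
      rw [if_pos hidx]
      simp
    · have hg : fnKeyG lines query (k, c, f) = none := by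
        simp [fnKeyG, hidx]
      simp only [List.map_cons, List.filterMap_cons, hg, fnScan]
      rw [if_neg hidx]
      exact ih

-- modular arithmetic helpers (variable modulus, so stated via Int.emod lemmas)
theorem emod_small {x n : Int} (h0 : 0 ≤ x) (h1 : x < n) : x % n = x := Int.emod_eq_of_lt h0 h1

theorem emod_shift (x n : Int) : (x + n) % n = x % n := by
  have h := Int.add_mul_emod_self_left (a := x) (b := n) (c := 1)
  simpa using h

theorem cyc1 {r row n : Int} (hr : 0 ≤ r) (hr2 : r < n) (hw : 0 ≤ row) (hw2 : row < n) :
    0 ≤ (r - row) % n ∧ (r - row) % n < n ∧ (row + (r - row) % n) % n = r ∧ ((r - row) % n = 0 ↔ r = row) := by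
  by_cases hc : row ≤ r
  · have h1 : (r - row) % n = r - row := emod_small (by omega) (by omega)
    rw [h1]
    refine ⟨by omega, by omega, ?_, by omega⟩
    have e : row + (r - row) = r := by ring
    rw [e]; exact emod_small hr hr2
  · have h1 : (r - row) % n = r - row + n := by
      calc (r - row) % n = ((r - row) + n) % n := (emod_shift _ _).symm
        _ = r - row + n := emod_small (by omega) (by omega)
    rw [h1]
    refine ⟨by omega, by omega, ?_, by omega⟩
    have e : row + (r - row + n) = r + n := by ring
    rw [e, emod_shift]; exact emod_small hr hr2

theorem cyc2 {i row n : Int} (hi : 0 ≤ i) (hi2 : i < n) (hw : 0 ≤ row) (hw2 : row < n) :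
    0 ≤ (row + i) % n ∧ (row + i) % n < n ∧ ((row + i) % n - row) % n = i ∧ ((row + i) % n = row ↔ i = 0) := by
  by_cases hc : row + i < n
  · have h1 : (row + i) % n = row + i := emod_small (by omega) hc
    rw [h1]
    refine ⟨by omega, by omega, ?_, by omega⟩
    have e : row + i - row = i := by ring
    rw [e]; exact emod_small hi hi2
  · have h1 : (row + i) % n = row + i - n := by
      have e : row + i - n + n = row + i := by ring
      calc (row + i) % n = (row + i - n + n) % n := by rw [e]
        _ = (row + i - n) % n := emod_shift _ _
        _ = row + i - n := emod_small (by omega) (by omega)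
    rw [h1]
    refine ⟨by omega, by omega, ?_, by omega⟩
    have e2 : row + i - n - row = i - n := by ring
    rw [e2]
    have e3 : i - n + n = i := by ring
    calc (i - n) % n = ((i - n) + n) % n := (emod_shift _ _).symm
      _ = i % n := by rw [e3]
      _ = i := emod_small hi hi2

-- B's per-row candidate function and the keyed-rotated candidate function
def fnF (lines : List String) (query : String) (row col total : Int) (r : Int) : Option (Int × Int × Int) :=
  let text := PySem.List.pyGetD lines r ""
  let idx := if r == row then pyFindFrom text query col else PySem.Str.find text query
  if idx ≥ 0 then some (PySem.Int.mod (r - row) total, r, idx) else none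

def fnG (lines : List String) (query : String) (row col total : Int) (i : Int) : Option (Int × Int × Int) :=
  fnKeyG lines query (i, PySem.Int.mod (row + i) total, if i == 0 then col else 0)

theorem fnHits_eq (lines : List String) (query : String) (row col total : Int) :
    fnHits lines query row col total = (PySem.List.pyRange 0 total 1).filterMap (fnF lines query row col total) := rfl

theorem fnRotHits_eq (lines : List String) (query : String) (row col total : Int) :
    fnRotHits lines query row col total = (PySem.List.pyRange 0 total 1).filterMap (fnG lines query row col total) := by
  unfold fnRotHits
  rw [List.filterMap_map]
  rfl

theorem fnFG (lines : List String) (query : String) (row col total : Int)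
    (h0 : 0 ≤ row) (h1 : row < total) (r : Int) (hr0 : 0 ≤ r) (hr1 : r < total) :
    fnF lines query row col total r = fnG lines query row col total (PySem.Int.mod (r - row) total) := by
  have hn : (0:Int) < total := by omega
  obtain ⟨hc0, hc1, hc2, hc3⟩ := cyc1 hr0 hr1 h0 h1
  unfold fnF fnG fnKeyG
  simp only [PySem.Int.mod_eq_emod_of_pos hn]
  rw [hc2]
  have hbeq : ((r - row) % total == 0) = (r == row) := by
    by_cases h : r = row
    · simp [h]
    · have hne : (r - row) % total ≠ 0 := fun e => h (hc3.mp e)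
      simp [h, hne]
  rw [hbeq]
  by_cases h : r = row
  · simp [h]
  · have hb : (r == row) = false := by simp [h]
    simp [hb, pyFindFrom_zero]

theorem fnGF (lines : List String) (query : String) (row col total : Int)
    (h0 : 0 ≤ row) (h1 : row < total) (i : Int) (hi0 : 0 ≤ i) (hi1 : i < total) :
    fnG lines query row col total i = fnF lines query row col total (PySem.Int.mod (row + i) total) := by
  have hn : (0:Int) < total := by omega
  obtain ⟨hc0, hc1, hc2, hc3⟩ := cyc2 hi0 hi1 h0 h1
  unfold fnF fnG fnKeyG
  simp only [PySem.Int.mod_eq_emod_of_pos hn]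
  rw [hc2]
  have hbeq : ((row + i) % total == row) = (i == 0) := by
    by_cases h : i = 0
    · simp [h, emod_small h0 h1]
    · have hne : (row + i) % total ≠ row := fun e => h (hc3.mp e)
      simp [h, hne]
  rw [hbeq]
  by_cases h : i = 0
  · simp [h]
  · have hb : (i == 0) = false := by simp [h]
    simp [hb, pyFindFrom_zero]

-- membership in B's hit list = membership in the keyed rotated hit list
theorem fnHits_mem_iff (lines : List String) (query : String) (row col total : Int)
    (h0 : 0 ≤ row) (h1 : row < total) (x : Int × Int × Int) :
    x ∈ fnHits lines query row col total ↔ x ∈ fnRotHits lines query row col total := by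
  have hn : (0:Int) < total := by omega
  rw [fnHits_eq, fnRotHits_eq]
  simp only [List.mem_filterMap, PySem.List.mem_pyRange_one]
  constructor
  · rintro ⟨r, ⟨hr0, hr1⟩, hF⟩
    obtain ⟨hc0, hc1, -, -⟩ := cyc1 hr0 hr1 h0 h1
    refine ⟨PySem.Int.mod (r - row) total, ?_, ?_⟩
    · rw [PySem.Int.mod_eq_emod_of_pos hn]; exact ⟨hc0, hc1⟩
    · rw [← fnFG lines query row col total h0 h1 r hr0 hr1]; exact hF
  · rintro ⟨i, ⟨hi0, hi1⟩, hG⟩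
    obtain ⟨hc0, hc1, -, -⟩ := cyc2 hi0 hi1 h0 h1
    refine ⟨PySem.Int.mod (row + i) total, ?_, ?_⟩
    · rw [PySem.Int.mod_eq_emod_of_pos hn]; exact ⟨hc0, hc1⟩
    · rw [← fnGF lines query row col total h0 h1 i hi0 hi1]; exact hG

-- tripLt characterisation and order facts
theorem tripLt_iff (a b : Int × Int × Int) :
    tripLt a b = true ↔ (a.1 < b.1 ∨ (a.1 = b.1 ∧ (a.2.1 < b.2.1 ∨ (a.2.1 = b.2.1 ∧ a.2.2 < b.2.2)))) := by
  simp [tripLt]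

theorem tripLt_irrefl (a : Int × Int × Int) : tripLt a a = false := by
  obtain ⟨a1, a2, a3⟩ := a
  simp [tripLt]

theorem tripLt_asymm {a b : Int × Int × Int} (h : tripLt a b = true) : tripLt b a = false := by
  obtain ⟨a1, a2, a3⟩ := a; obtain ⟨b1, b2, b3⟩ := b
  rw [tripLt_iff] at h
  rw [Bool.eq_false_iff, ne_eq, tripLt_iff]
  simp only at *
  omega

theorem trip_le_trans {a b c : Int × Int × Int} (h1 : tripLt a b = false) (h2 : tripLt b c = false) :
    tripLt a c = false := by
  obtain ⟨a1, a2, a3⟩ := a; obtain ⟨b1, b2, b3⟩ := b; obtain ⟨c1, c2, c3⟩ := c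
  rw [Bool.eq_false_iff, ne_eq, tripLt_iff] at h1 h2
  rw [Bool.eq_false_iff, ne_eq, tripLt_iff]
  simp only at *
  omega

theorem tripLt_antisymm_eq {a b : Int × Int × Int} (h1 : tripLt a b = false) (h2 : tripLt b a = false) :
    a = b := by
  obtain ⟨a1, a2, a3⟩ := a; obtain ⟨b1, b2, b3⟩ := b
  rw [Bool.eq_false_iff, ne_eq, tripLt_iff] at h1 h2
  simp only at *
  have h : a1 = b1 ∧ a2 = b2 ∧ a3 = b3 := by omega
  simp [h.1, h.2.1, h.2.2]

-- tripMin returns a member that no element of the list beats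
theorem tripMin_spec (t : List (Int × Int × Int)) : ∀ b : Int × Int × Int,
    tripMin b t ∈ b :: t ∧ ∀ x ∈ b :: t, tripLt x (tripMin b t) = false := by
  induction t with
  | nil =>
    intro b
    refine ⟨List.mem_cons_self .., ?_⟩
    intro x hx
    have hxb : x = b := by simpa using hx
    simp [hxb, tripMin, tripLt_irrefl]
  | cons h rest ih =>
    intro b
    obtain ⟨ihmem, ihmin⟩ := ih (if tripLt h b then h else b)
    have hbb' : tripLt b (if tripLt h b then h else b) = false := by
      by_cases hc : tripLt h b = true
      · rw [if_pos hc]; exact tripLt_asymm hc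
      · rw [if_neg hc]; exact tripLt_irrefl b
    have hhb' : tripLt h (if tripLt h b then h else b) = false := by
      by_cases hc : tripLt h b = true
      · rw [if_pos hc]; exact tripLt_irrefl h
      · rw [if_neg hc]; exact Bool.eq_false_iff.mpr hc
    have hb'r : tripLt (if tripLt h b then h else b)
        (tripMin (if tripLt h b then h else b) rest) = false :=
      ihmin _ (List.mem_cons_self ..)
    constructor
    · simp only [tripMin]
      rcases List.mem_cons.mp ihmem with h' | h'
      · rw [h']
        by_cases hc : tripLt h b = true
        · rw [if_pos hc]; exact List.mem_cons.mpr (Or.inr (List.mem_cons_self ..))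
        · rw [if_neg hc]; exact List.mem_cons_self ..
      · exact List.mem_cons.mpr (Or.inr (List.mem_cons.mpr (Or.inr h')))
    · intro x hx
      simp only [tripMin]
      rcases List.mem_cons.mp hx with hxb | hx2
      · subst hxb; exact trip_le_trans hbb' hb'r
      · rcases List.mem_cons.mp hx2 with hxh | hxr
        · subst hxh; exact trip_le_trans hhb' hb'r
        · exact ihmin x (List.mem_cons.mpr (Or.inr hxr))

-- the rotated hit list is sorted by its distance key, so its head is tripLt-minimal
theorem fnG_key {lines : List String} {query : String} {row col total i : Int} {x : Int × Int × Int}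
    (h : fnG lines query row col total i = some x) : x.1 = i := by
  simp only [fnG, fnKeyG] at h
  split at h <;> split at h
  all_goals first
    | rw [← Option.some.inj h]
    | exact absurd h (by simp)

theorem fnRotHits_pairwise (lines : List String) (query : String) (row col total : Int) :
    (fnRotHits lines query row col total).Pairwise (fun a b => a.1 < b.1) := by
  rw [fnRotHits_eq, List.pairwise_filterMap]
  refine (PySem.List.pairwise_lt_pyRange_one (a := 0) (b := total)).imp ?_
  intro a b hab x hx y hy
  rw [fnG_key hx, fnG_key hy]
  exact hab

theorem head_min_of_pairwise (h : Int × Int × Int) (t : List (Int × Int × Int))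
    (hp : (h :: t).Pairwise (fun a b => a.1 < b.1)) :
    ∀ x ∈ h :: t, tripLt x h = false := by
  intro x hx
  rcases List.mem_cons.mp hx with hx | hx
  · simp [hx, tripLt_irrefl]
  · have hlt : h.1 < x.1 := (List.pairwise_cons.mp hp).1 x hx
    rw [Bool.eq_false_iff, ne_eq, tripLt_iff]
    omega

-- ===== VERDICT (by name: the statement is the Claim_ definition above) =====
theorem find_next_spec : Claim_equal_find_next := by
  intro lines query start_row start_col _
  unfold Spec_find_next find_next find_next_alt
  by_cases hq : query = ""
  · simp [hq]
  · by_cases hl : lines = []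
    · simp [hq, hl]
    · simp only [hq, hl, or_self, if_false]
      have htot : 0 < (lines.length : Int) := by
        have h : lines ≠ [] := hl
        have h2 := List.length_pos_iff.mpr h
        exact_mod_cast h2
      set total : Int := (lines.length : Int) with htdef
      set row := max 0 (min start_row (total - 1)) with hrdef
      set col := max 0 start_col with hcdef
      have h0 : 0 ≤ row := by omega
      have h1 : row < total := by omega
      -- A's value = head of the keyed rotated hit list
      have hA : (match fnLoop1 lines query row col (PySem.List.pyRange row total 1) with
          | some r => some r
          | none => fnLoop2 lines query (PySem.List.pyRange 0 row 1))
          = ((fnRotHits lines query row col total).head?).map (fun t => (t.2.1, t.2.2)) := by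
        rw [fnLoop1_eq_scan, fnLoop2_eq_scan, ← fnScan_append, ← fnRotated_split row total col h0 h1]
        have hmm : (PySem.List.pyRange 0 total 1).map
            (fun i => (PySem.Int.mod (row + i) total, if i == 0 then col else (0:Int)))
            = ((PySem.List.pyRange 0 total 1).map
                (fun i => (i, PySem.Int.mod (row + i) total, if i == 0 then col else (0:Int)))).map
                (fun t => (t.2.1, t.2.2)) := by
          rw [List.map_map]
          rfl
        rw [hmm, fnScan_eq_head]
        rfl
      rw [hA]
      have hmem := fnHits_mem_iff lines query row col total h0 h1
      cases hH : fnHits lines query row col total with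
      | nil =>
        have hR : fnRotHits lines query row col total = [] := by
          rw [List.eq_nil_iff_forall_not_mem]
          intro x hx
          exact (List.eq_nil_iff_forall_not_mem.mp hH x) ((hmem x).mpr hx)
        simp [hR]
      | cons h t =>
        cases hR : fnRotHits lines query row col total with
        | nil =>
          exact absurd ((hmem h).mp (hH ▸ List.mem_cons_self ..)) (by simp [hR])
        | cons h' t' =>
          simp only [List.head?_cons, Option.map_some]
          have hmspec := tripMin_spec t h
          have hm_mem : tripMin h t ∈ fnRotHits lines query row col total :=
            (hmem _).mp (hH ▸ hmspec.1)
          have hh'_mem : h' ∈ fnHits lines query row col total :=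
            (hmem h').mpr (hR ▸ List.mem_cons_self ..)
          have hp := fnRotHits_pairwise lines query row col total
          rw [hR] at hp
          have hmin' := head_min_of_pairwise h' t' hp
          have e1 : tripLt (tripMin h t) h' = false := hmin' _ (hR ▸ hm_mem)
          have e2 : tripLt h' (tripMin h t) = false := hmspec.2 h' (hH ▸ hh'_mem)
          have e3 : tripMin h t = h' := tripLt_antisymm_eq e1 e2
          rw [e3]
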